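-- pv_equiv track=rewrite | github.com/GitMonsters/octotetrahedral-agi | arc-puzzle-catalog/re-arc/solves/6f14590a/solver.py | find_row_signatures
-- ===== SOURCE A (Python) =====
-- from collections import Counter, defaultdict
-- from typing import DefaultDict, List, Tuple
--
-- Grid = List[List[int]]
--
-- Signature = Tuple[int, int, int, int]
--
-- def find_row_signatures(grid: Grid) -> DefaultDict[Signature, List[int]]:
--     signatures: DefaultDict[Signature, List[int]] = defaultdict(list)
--     width = len(grid[0])
--     for row_index, row in enumerate(grid):
--         for left in range(width - 2):
--             edge = row[left]
--             fill = row[left + 1]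
--             if edge == fill:
--                 continue
--             right = left + 1
--             while right < width and row[right] == fill:
--                 right += 1
--             if right < width and row[right] == edge and right - left >= 2:
--                 signatures[(edge, fill, left, right)].append(row_index)
--     return signatures
-- ===== SOURCE B (Python) =====
-- from collections import defaultdict
-- from typing import DefaultDict, List, Tuple
--
-- Grid = List[List[int]]
-- Signature = Tuple[int, int, int, int]
--
-- def find_row_signatures(grid: Grid) -> DefaultDict[Signature, List[int]]:
--     signatures: DefaultDict[Signature, List[int]] = defaultdict(list)
--     width = len(grid[0])
--     for row_index, row in enumerate(grid):
--         # run-length encode the first `width` cells: (value, start, length) runs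
--         runs = []
--         cells = row[:width]
--         n = len(cells)
--         i = 0
--         while i < n:
--             j = i + 1
--             while j < n and cells[j] == cells[i]:
--                 j += 1
--             runs.append((cells[i], i, j - i))
--             i = j
--         # an edge-fill-edge pattern is a run triple whose outer runs share a value
--         for r0, r1, r2 in zip(runs, runs[1:], runs[2:]):
--             if r0[0] == r2[0]:
--                 signatures[(r0[0], r1[0], r0[1] + r0[2] - 1, r2[1])].append(row_index)
--     return signatures
-- ===== Notes on version B (the rewrite author's own statement) =====
-- stated objective: alternative
-- what changed: Instead of A's per-position loop that re-derives each pattern with an inner while-scan over the fill run, B run-length encodes each row once into (value,start,length) runs and reads every edge-fill-edge pattern directly off consecutive run triples whose outer values match.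
-- outside the precondition, e.g. on find_row_signatures([[1, 2, 3], [4, 5]]): A raises IndexError, B returns {}; on find_row_signatures([[1, 2, 3], [4, 4]]): A returns {}, B returns {}
import Mathlib
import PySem

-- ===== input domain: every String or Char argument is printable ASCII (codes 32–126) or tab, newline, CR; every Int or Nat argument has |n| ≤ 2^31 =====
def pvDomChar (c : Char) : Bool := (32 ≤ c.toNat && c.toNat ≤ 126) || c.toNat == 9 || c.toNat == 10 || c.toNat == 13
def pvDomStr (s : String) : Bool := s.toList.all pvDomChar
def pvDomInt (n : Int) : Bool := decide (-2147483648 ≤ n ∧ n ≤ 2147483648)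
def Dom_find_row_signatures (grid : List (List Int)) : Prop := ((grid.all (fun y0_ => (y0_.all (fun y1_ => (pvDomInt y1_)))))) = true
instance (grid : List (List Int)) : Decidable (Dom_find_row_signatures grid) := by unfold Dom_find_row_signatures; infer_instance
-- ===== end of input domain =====

-- B replaces A's per-position boundary loop (with its inner while-scan over the fill run) by a
-- run-length encoding of each row, reading each edge-fill-edge pattern off consecutive run triples.

-- ===== PORT A =====
-- defaultdict(list)[k].append(i) : overwrite-in-place insert keeps first-insertion order, like Python
def pvDictAppend (d : PySem.Dict (Int × Int × Int × Int) (List Int))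
    (k : Int × Int × Int × Int) (i : Int) : PySem.Dict (Int × Int × Int × Int) (List Int) :=
  d.insert k (d.getD k [] ++ [i])

-- `while right < width and row[right] == fill: right += 1` (fuel = remaining distance to width)
def pvScanA (row : List Int) (width fill : Int) : Int → Nat → Int
  | right, 0 => right
  | right, fuel + 1 =>
      if right < width ∧ PySem.List.pyGetD row right 0 = fill
      then pvScanA row width fill (right + 1) fuel
      else right

def find_row_signatures (grid : List (List Int)) : List (Int × Int × Int × Int × List Int) :=
  let width : Int := ((PySem.List.pyGetD grid 0 []).length : Int)   -- len(grid[0]); Pre_ excludes grid = []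
  let d :=
    (PySem.List.enumerate grid 0).foldl (fun d p =>
      let row_index := p.1
      let row := p.2
      (PySem.List.pyRange 0 (width - 2) 1).foldl (fun d left =>
        let edge := PySem.List.pyGetD row left 0
        let fill := PySem.List.pyGetD row (left + 1) 0
        if edge = fill then d
        else
          let right := pvScanA row width fill (left + 1) (width - (left + 1)).toNat
          if right < width ∧ PySem.List.pyGetD row right 0 = edge ∧ 2 ≤ right - left
          then pvDictAppend d (edge, fill, left, right) row_index
          else d) d) PySem.Dict.empty
  d.items.map (fun p => (p.1.1, p.1.2.1, p.1.2.2.1, p.1.2.2.2, p.2))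

-- ===== PORT B =====
-- the two nested whiles over indices of `cells`, structurally: each step peels one maximal run
def pvRunsB : List Int → Int → List (Int × Int × Int)
  | [], _ => []
  | x :: xs, i =>
      (x, i, (xs.takeWhile (· == x)).length + 1) ::
        pvRunsB (xs.dropWhile (· == x)) (i + (xs.takeWhile (· == x)).length + 1)
  termination_by cs _ => cs.length
  decreasing_by
    simp only [List.length_cons]
    have := List.length_dropWhile_le (p := (· == x)) (l := xs)
    omega

def find_row_signatures_alt (grid : List (List Int)) : List (Int × Int × Int × Int × List Int) :=
  let width : Int := ((PySem.List.pyGetD grid 0 []).length : Int)   -- len(grid[0]); Pre_ excludes grid = []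
  let d :=
    (PySem.List.enumerate grid 0).foldl (fun d p =>
      let row_index := p.1
      let cells := PySem.List.slice p.2 none (some width)           -- row[:width]
      let runs := pvRunsB cells 0
      (runs.zip ((PySem.List.slice runs (some 1) none).zip (PySem.List.slice runs (some 2) none))).foldl
        (fun d t =>
          if t.1.1 = t.2.2.1 then
            pvDictAppend d (t.1.1, t.2.1.1, t.1.2.1 + t.1.2.2 - 1, t.2.2.2.1) row_index
          else d) d) PySem.Dict.empty
  d.items.map (fun p => (p.1.1, p.1.2.1, p.1.2.2.1, p.1.2.2.2, p.2))

-- ===== PRECONDITION & SPEC =====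
-- Pre_ excludes the empty grid (A raises IndexError on grid[0]) and, when the first row has at
-- least 3 cells, ragged grids with a row shorter than the first row, where A's index accesses
-- usually raise IndexError mid-scan (though on some cell values A still returns).
def Pre_find_row_signatures (grid : List (List Int)) : Prop :=
  grid ≠ [] ∧ ((grid.headD []).length ≤ 2 ∨ ∀ row ∈ grid, (grid.headD []).length ≤ row.length)
instance (grid : List (List Int)) : Decidable (Pre_find_row_signatures grid) := by
  unfold Pre_find_row_signatures; infer_instance

def pvWitness_find_row_signatures : List (List Int) := [[1, 2, 1], [3, 3, 3], [1, 2, 2]]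

def Spec_find_row_signatures (grid : List (List Int)) (out : List (Int × Int × Int × Int × List Int)) : Prop := out = find_row_signatures_alt grid
instance (grid : List (List Int)) (out : List (Int × Int × Int × Int × List Int)) : Decidable (Spec_find_row_signatures grid out) := by unfold Spec_find_row_signatures; infer_instance

-- ===== CLAIM (what is proved, stated in full; the proofs are below) =====
def Claim_equal_find_row_signatures : Prop := ∀ (grid : List (List Int)), Dom_find_row_signatures grid → Pre_find_row_signatures grid → Spec_find_row_signatures grid (find_row_signatures grid)

-- ===== LEMMAS AND PROOFS =====

-- the key A emits at boundary position `left` (none = no append), read off A's inner-loop body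
def pvEmitA (row : List Int) (width : Int) (left : Int) : Option (Int × Int × Int × Int) :=
  let edge := PySem.List.pyGetD row left 0
  let fill := PySem.List.pyGetD row (left + 1) 0
  if edge = fill then none
  else
    let right := pvScanA row width fill (left + 1) (width - (left + 1)).toNat
    if right < width ∧ PySem.List.pyGetD row right 0 = edge ∧ 2 ≤ right - left
    then some (edge, fill, left, right)
    else none

-- the key B emits at a run triple
def pvEmitB (t : (Int × Int × Int) × (Int × Int × Int) × (Int × Int × Int)) : Option (Int × Int × Int × Int) :=
  if t.1.1 = t.2.2.1 then some (t.1.1, t.2.1.1, t.1.2.1 + t.1.2.2 - 1, t.2.2.2.1) else none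

def pvGo (rs : List (Int × Int × Int)) : List (Int × Int × Int × Int) :=
  (rs.zip (rs.tail.zip rs.tail.tail)).filterMap pvEmitB

-- structural form of A's boundary loop on the truncated row, offset o = absolute position
def pvAux : List Int → Int → List (Int × Int × Int × Int)
  | x :: y :: t, o =>
      (if x ≠ y ∧ t.dropWhile (· == y) ≠ [] ∧ (t.dropWhile (· == y)).headD 0 = x
       then [(x, y, o, o + 2 + ((t.takeWhile (· == y)).length : Int))] else []) ++ pvAux (y :: t) (o + 1)
  | _, _ => []

theorem pvFoldlEmit {α : Type} (l : List α) (f : α → Option (Int × Int × Int × Int))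
    (d : PySem.Dict (Int × Int × Int × Int) (List Int)) (ri : Int)
    (g : PySem.Dict (Int × Int × Int × Int) (List Int) → α → PySem.Dict (Int × Int × Int × Int) (List Int))
    (hg : ∀ d x, g d x = match f x with | some k => pvDictAppend d k ri | none => d) :
    l.foldl g d = (l.filterMap f).foldl (fun d k => pvDictAppend d k ri) d := by
  induction l generalizing d with
  | nil => simp
  | cons x xs ih =>
      simp only [List.foldl_cons, hg, List.filterMap_cons]
      cases hfx : f x <;> simp [ih]

theorem pvScanA_spec (row : List Int) (w : Nat) (hw : w ≤ row.length) (y : Int) :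
    ∀ (fuel : Nat) (j : Int), 0 ≤ j → j ≤ (w : Int) → fuel = ((w : Int) - j).toNat →
      pvScanA row (w : Int) y j fuel
        = j + (((((row.take w).drop j.toNat).takeWhile (· == y)).length : Int)) := by
  intro fuel
  induction fuel with
  | zero =>
      intro j hj0 hjw hfuel
      have hj : j = (w : Int) := by omega
      subst hj
      simp [pvScanA]
  | succ fuel ih =>
      intro j hj0 hjw hfuel
      have hjlt : j < (w : Int) := by omega
      have hjlen : j < (row.length : Int) := by
        have : (w : Int) ≤ (row.length : Int) := by exact_mod_cast hw
        omega
      have hjn : j.toNat < w := by omega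
      have hjnlen : j.toNat < (row.take w).length := by
        rw [List.length_take]
        omega
      have hdrop : (row.take w).drop j.toNat = (row.take w)[j.toNat] :: (row.take w).drop (j.toNat + 1) :=
        (List.getElem_cons_drop hjnlen).symm
      have hgetD : PySem.List.pyGetD row j 0 = (row.take w)[j.toNat] := by
        rw [PySem.List.pyGetD_eq_getElem row 0 hj0 hjlen]
        simp [List.getElem_take]
      by_cases hy : (row.take w)[j.toNat] = y
      · have hcond : (j < (w : Int) ∧ PySem.List.pyGetD row j 0 = y) := ⟨hjlt, by rw [hgetD, hy]⟩
        have hstep : pvScanA row (w : Int) y j (fuel + 1) = pvScanA row (w : Int) y (j + 1) fuel := by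
          simp only [pvScanA]
          rw [if_pos hcond]
        rw [hstep, ih (j + 1) (by omega) (by omega) (by omega), hdrop]
        have h1 : (j + 1).toNat = j.toNat + 1 := by omega
        simp [hy, h1]
        omega
      · have hcond : ¬ (j < (w : Int) ∧ PySem.List.pyGetD row j 0 = y) := by
          rw [hgetD]; tauto
        have hstop : pvScanA row (w : Int) y j (fuel + 1) = j := by
          simp only [pvScanA]
          rw [if_neg hcond]
        replace hy : ¬ row[j.toNat] = y := by simpa using hy
        rw [hstop, hdrop]
        simp [hy]

theorem pvAux_short (r : List Int) (h : r.length ≤ 2) (o : Int) : pvAux r o = [] := by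
  match r with
  | [] => rfl
  | [x] => rfl
  | [x, y] => simp [pvAux]
  | x :: y :: z :: t => simp at h

theorem pvDropTakeWhile (t : List Int) (y : Int) :
    t.drop (t.takeWhile (· == y)).length = t.dropWhile (· == y) := by
  induction t with
  | nil => rfl
  | cons a t ih =>
      by_cases h : (a == y) = true
      · simp [h, ih]
      · simp [h]

-- what A's inner-loop body emits at a boundary whose 2-cell lookahead is x, y and whose tail is t
theorem pvEmitA_eq (row : List Int) (w : Nat) (hw : w ≤ row.length) (k : Int) (hk0 : 0 ≤ k)
    (hk3 : k + 3 ≤ (w : Int)) (x y : Int) (t : List Int)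
    (hxt : (row.take w).drop k.toNat = x :: y :: t) :
    pvEmitA row (w : Int) k
      = (if x ≠ y ∧ t.dropWhile (· == y) ≠ [] ∧ (t.dropWhile (· == y)).headD 0 = x
         then some (x, y, k, k + 2 + ((t.takeWhile (· == y)).length : Int)) else none) := by
  have hA : (row.take w).length = w := by rw [List.length_take]; omega
  have hkn2 : k.toNat + 2 ≤ w := by omega
  have e1 : (row.take w).drop k.toNat
      = (row.take w)[k.toNat]'(by omega) :: (row.take w).drop (k.toNat + 1) :=
    (List.getElem_cons_drop (by omega)).symm
  have e2 : (row.take w).drop (k.toNat + 1)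
      = (row.take w)[k.toNat + 1]'(by omega) :: (row.take w).drop (k.toNat + 2) :=
    (List.getElem_cons_drop (by omega)).symm
  rw [e1, e2] at hxt
  obtain ⟨hx, hy, ht⟩ : (row.take w)[k.toNat]'(by omega) = x ∧
      (row.take w)[k.toNat + 1]'(by omega) = y ∧ (row.take w).drop (k.toNat + 2) = t := by
    simpa using hxt
  have hedge : PySem.List.pyGetD row k 0 = x := by
    rw [PySem.List.pyGetD_eq_getElem row 0 hk0 (by omega), ← hx]
    simp [List.getElem_take]
  have hfill : PySem.List.pyGetD row (k + 1) 0 = y := by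
    rw [PySem.List.pyGetD_eq_getElem row 0 (by omega) (by omega), ← hy]
    have : (k + 1).toNat = k.toNat + 1 := by omega
    simp [this, List.getElem_take]
  have hdrop1 : (row.take w).drop (k.toNat + 1) = y :: t := by rw [e2, hy, ht]
  have hscan : pvScanA row (w : Int) y (k + 1) ((w : Int) - (k + 1)).toNat
      = k + 2 + ((t.takeWhile (· == y)).length : Int) := by
    rw [pvScanA_spec row w hw y _ (k + 1) (by omega) (by omega) rfl]
    have h1 : (k + 1).toNat = k.toNat + 1 := by omega
    rw [h1, hdrop1]
    simp
    omega
  have hts : (t.takeWhile (· == y)).length + (t.dropWhile (· == y)).length = t.length := by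
    rw [← List.length_append, List.takeWhile_append_dropWhile]
  have htlen : t.length = w - (k.toNat + 2) := by rw [← ht, List.length_drop, hA]
  simp only [pvEmitA, hedge, hfill, hscan]
  by_cases hxy : x = y
  · simp [hxy]
  · rw [if_neg hxy]
    cases hs : t.dropWhile (· == y) with
    | nil =>
        have : ¬ (k + 2 + ((t.takeWhile (· == y)).length : Int) < (w : Int)) := by
          rw [hs] at hts; simp at hts; omega
        simp [this, hxy]
    | cons z s' =>
        have hslen : 0 < (t.dropWhile (· == y)).length := by rw [hs]; simp
        have hlt : k + 2 + ((t.takeWhile (· == y)).length : Int) < (w : Int) := by omega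
        have hm : (k + 2 + ((t.takeWhile (· == y)).length : Int)).toNat
            = k.toNat + 2 + (t.takeWhile (· == y)).length := by omega
        have hdt : t.drop (t.takeWhile (· == y)).length = z :: s' := by
          rw [pvDropTakeWhile, hs]
        have hAd : (row.take w).drop (k.toNat + 2 + (t.takeWhile (· == y)).length) = z :: s' := by
          rw [← List.drop_drop, ht, hdt]
        have hz : (row.take w)[k.toNat + 2 + (t.takeWhile (· == y)).length]'(by omega) = z := by
          have := (List.getElem_cons_drop
            (show k.toNat + 2 + (t.takeWhile (· == y)).length < (row.take w).length by omega)).symm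
          rw [hAd] at this
          exact (List.cons.injEq _ _ _ _ ▸ this).1.symm
        have hright : PySem.List.pyGetD row (k + 2 + ((t.takeWhile (· == y)).length : Int)) 0 = z := by
          rw [PySem.List.pyGetD_eq_getElem row 0 (by omega) (by omega)]
          simp only [hm]
          rw [← hz]
          simp [List.getElem_take]
        have hc1 : ((k + 2 + ((t.takeWhile (· == y)).length : Int) < (w : Int) ∧
            PySem.List.pyGetD row (k + 2 + ((t.takeWhile (· == y)).length : Int)) 0 = x ∧
            2 ≤ k + 2 + ((t.takeWhile (· == y)).length : Int) - k) ↔ (z = x)) := by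
          rw [hright]
          constructor
          · rintro ⟨-, h, -⟩; exact h
          · intro h; exact ⟨hlt, h, by omega⟩
        rw [if_congr hc1 rfl rfl]
        simp [hxy]

-- A's boundary loop from absolute position k equals pvAux on the k-dropped truncated row
theorem pvRangeA_eq_aux (row : List Int) (w : Nat) (hw : w ≤ row.length) :
    ∀ (n : Nat) (k : Int), 0 ≤ k → ((w : Int) - k).toNat ≤ n →
      (PySem.List.pyRange k ((w : Int) - 2) 1).filterMap (pvEmitA row (w : Int))
        = pvAux ((row.take w).drop k.toNat) k := by
  intro n
  induction n with
  | zero =>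
      intro k hk0 hkn
      have hnil : (row.take w).drop k.toNat = [] := by
        apply List.drop_eq_nil_of_le
        rw [List.length_take]
        omega
      rw [hnil, PySem.List.pyRange_one_eq_nil (by omega)]
      rfl
  | succ n ih =>
      intro k hk0 hkn
      by_cases hbig : k + 2 ≤ (w : Int)
      · have hA : (row.take w).length = w := by rw [List.length_take]; omega
        have e1 : (row.take w).drop k.toNat
            = (row.take w)[k.toNat]'(by omega) :: (row.take w).drop (k.toNat + 1) :=
          (List.getElem_cons_drop (by omega)).symm
        have e2 : (row.take w).drop (k.toNat + 1)
            = (row.take w)[k.toNat + 1]'(by omega) :: (row.take w).drop (k.toNat + 2) :=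
          (List.getElem_cons_drop (by omega)).symm
        by_cases hk3 : k + 3 ≤ (w : Int)
        · have hcons : PySem.List.pyRange k ((w : Int) - 2) 1
              = k :: PySem.List.pyRange (k + 1) ((w : Int) - 2) 1 :=
            PySem.List.pyRange_one_cons (by omega)
          have hih := ih (k + 1) (by omega) (by omega)
          have h1 : (k + 1).toNat = k.toNat + 1 := by omega
          rw [h1] at hih
          have hemit := pvEmitA_eq row w hw k hk0 hk3 _ _ _ (by rw [e1, e2])
          rw [hcons, List.filterMap_cons, hemit, e1, e2]
          show _ = pvAux (_ :: _ :: _) k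
          rw [pvAux]
          rw [hih, ← e2]
          split_ifs <;> simp
        · -- k = w - 2: the range is empty and exactly 2 cells remain
          have hle : ((row.take w).drop k.toNat).length ≤ 2 := by
            rw [List.length_drop, List.length_take]
            omega
          rw [PySem.List.pyRange_one_eq_nil (by omega), pvAux_short _ hle]
          rfl
      · -- k = w - 2 or beyond: the range is empty and at most 2 cells remain
        have hle : ((row.take w).drop k.toNat).length ≤ 2 := by
          rw [List.length_drop, List.length_take]
          omega
        rw [PySem.List.pyRange_one_eq_nil (by omega), pvAux_short _ hle]
        rfl

-- shifting one cell from a run's length to its start does not change the emitted triples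
theorem pvGo_shift (a : Int) (st L : Int) (R : List (Int × Int × Int)) :
    pvGo ((a, st, L + 1) :: R) = pvGo ((a, st + 1, L) :: R) := by
  match R with
  | [] => rfl
  | [r1] => rfl
  | r1 :: r2 :: rest =>
      simp only [pvGo, List.tail_cons, List.zip_cons_cons, List.filterMap_cons]
      congr 1
      simp only [pvEmitB]
      split_ifs
      · simp only [Option.some.injEq, Prod.mk.injEq, and_true, true_and]
        ring
      · rfl

theorem pvGo_cons (r0 r1 r2 : Int × Int × Int) (rest : List (Int × Int × Int)) :
    pvGo (r0 :: r1 :: r2 :: rest) = (pvEmitB (r0, r1, r2)).toList ++ pvGo (r1 :: r2 :: rest) := by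
  simp only [pvGo, List.tail_cons, List.zip_cons_cons, List.filterMap_cons]
  cases h : pvEmitB (r0, r1, r2) <;> simp

theorem pvGo_runs_eq_aux : ∀ (n : Nat) (r : List Int), r.length ≤ n → ∀ (o : Int),
    pvGo (pvRunsB r o) = pvAux r o := by
  intro n
  induction n with
  | zero =>
      intro r hr o
      have hnil : r = [] := by cases r <;> simp_all
      subst hnil
      simp [pvRunsB, pvGo, pvAux]
  | succ n ih =>
      intro r hr o
      match r with
      | [] => simp [pvRunsB, pvGo, pvAux]
      | [x] => simp [pvRunsB, pvGo, pvAux]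
      | x :: y :: t =>
          simp only [List.length_cons] at hr
          by_cases hxy : x = y
          · subst hxy
            have hrun1 : pvRunsB (x :: x :: t) o
                = (x, o, ((t.takeWhile (· == x)).length : Int) + 1 + 1)
                  :: pvRunsB (t.dropWhile (· == x))
                      (o + 1 + ((t.takeWhile (· == x)).length : Int) + 1) := by
              rw [pvRunsB]
              simp
              congr 1
              ring
            have hrun2 : pvRunsB (x :: t) (o + 1)
                = (x, o + 1, ((t.takeWhile (· == x)).length : Int) + 1)
                  :: pvRunsB (t.dropWhile (· == x))
                      (o + 1 + ((t.takeWhile (· == x)).length : Int) + 1) := by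
              rw [pvRunsB]
            rw [hrun1, pvGo_shift, ← hrun2, ih (x :: t) (by simp; omega) (o + 1)]
            rw [pvAux]
            simp
          · have hbe : (y == x) = false := by
              simp
              intro h; exact hxy h.symm
            have hrun1 : pvRunsB (x :: y :: t) o = (x, o, 1) :: pvRunsB (y :: t) (o + 1) := by
              rw [pvRunsB]
              simp [hbe]
            have hrun2 : pvRunsB (y :: t) (o + 1)
                = (y, o + 1, ((t.takeWhile (· == y)).length : Int) + 1)
                  :: pvRunsB (t.dropWhile (· == y))
                      (o + 1 + ((t.takeWhile (· == y)).length : Int) + 1) := by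
              rw [pvRunsB]
            have hih := ih (y :: t) (by simp; omega) (o + 1)
            cases hs : t.dropWhile (· == y) with
            | nil =>
                have hR : pvRunsB (t.dropWhile (· == y))
                    (o + 1 + ((t.takeWhile (· == y)).length : Int) + 1) = [] := by
                  rw [hs, pvRunsB]
                rw [hrun1, hrun2, hR]
                rw [pvAux]
                rw [hrun2, hR] at hih
                rw [← hih, hs]
                simp [pvGo]
            | cons z s' =>
                have hR : pvRunsB (t.dropWhile (· == y))
                    (o + 1 + ((t.takeWhile (· == y)).length : Int) + 1)
                    = (z, o + 1 + ((t.takeWhile (· == y)).length : Int) + 1,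
                        ((s'.takeWhile (· == z)).length : Int) + 1)
                      :: pvRunsB (s'.dropWhile (· == z))
                          (o + 1 + ((t.takeWhile (· == y)).length : Int) + 1
                            + ((s'.takeWhile (· == z)).length : Int) + 1) := by
                  rw [hs, pvRunsB]
                rw [hrun1, hrun2, hR, pvGo_cons, ← hR, ← hrun2, hih]
                rw [pvAux]
                rw [hs]
                simp only [pvEmitB]
                by_cases hzx : x = z
                · subst hzx
                  rw [if_pos rfl, if_pos (by simp [hxy])]
                  simp only [Option.toList_some, List.cons_append, List.nil_append,
                    List.cons.injEq, Prod.mk.injEq, and_true, true_and]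
                  constructor <;> ring
                · rw [if_neg hzx, if_neg (by simp [hxy]; intro h; exact absurd h.symm hzx)]
                  simp


-- one row: A's boundary loop and B's run-triple loop perform the same dict updates
theorem pvRow_eq (w : Nat) (row : List Int) (hrow : w ≤ 2 ∨ w ≤ row.length)
    (d : PySem.Dict (Int × Int × Int × Int) (List Int)) (ri : Int) :
    (PySem.List.pyRange 0 ((w : Int) - 2) 1).foldl (fun d left =>
        let edge := PySem.List.pyGetD row left 0
        let fill := PySem.List.pyGetD row (left + 1) 0
        if edge = fill then d
        else
          let right := pvScanA row (w : Int) fill (left + 1) ((w : Int) - (left + 1)).toNat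
          if right < (w : Int) ∧ PySem.List.pyGetD row right 0 = edge ∧ 2 ≤ right - left
          then pvDictAppend d (edge, fill, left, right) ri
          else d) d
    = (let runs := pvRunsB (PySem.List.slice row none (some (w : Int))) 0
       (runs.zip ((PySem.List.slice runs (some 1) none).zip (PySem.List.slice runs (some 2) none))).foldl
        (fun d t => if t.1.1 = t.2.2.1 then
            pvDictAppend d (t.1.1, t.2.1.1, t.1.2.1 + t.1.2.2 - 1, t.2.2.2.1) ri else d) d) := by
  rw [pvFoldlEmit _ (pvEmitA row (w : Int)) d ri _
      (fun d left => by simp only [pvEmitA]; split_ifs <;> rfl)]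
  simp only []
  rw [pvFoldlEmit _ pvEmitB d ri _
      (fun d t => by simp only [pvEmitB]; split_ifs <;> rfl)]
  congr 1
  rw [PySem.List.slice_to_natCast, PySem.List.slice_from_one,
      show PySem.List.slice (pvRunsB (row.take w) 0) (some 2) none
          = (pvRunsB (row.take w) 0).tail.tail by
        rw [PySem.List.slice_from _ (by norm_num)]
        simp [← List.drop_one, List.drop_drop]]
  show _ = pvGo (pvRunsB (row.take w) 0)
  rw [pvGo_runs_eq_aux (row.take w).length _ le_rfl 0]
  by_cases hw : w ≤ row.length
  · have := pvRangeA_eq_aux row w hw w 0 le_rfl (by omega)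
    simpa using this
  · have hw2 : w ≤ 2 := by tauto
    rw [PySem.List.pyRange_one_eq_nil (by omega),
        pvAux_short _ (by rw [List.length_take]; omega)]
    rfl

-- ===== VERDICT (by name: the statement is the Claim_ definition above) =====
theorem find_row_signatures_spec : Claim_equal_find_row_signatures := by
  intro grid _hdom hpre
  unfold Spec_find_row_signatures
  obtain ⟨hne, hcase⟩ := hpre
  cases grid with
  | nil => exact absurd rfl hne
  | cons g0 gs =>
      simp only [find_row_signatures, find_row_signatures_alt, PySem.List.pyGetD_zero_cons]
      congr 1
      congr 1
      apply PySem.List.foldl_congr_mem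
      intro acc p hp
      obtain ⟨k, hk, rfl⟩ := (PySem.List.mem_enumerate_iff _ _ _).mp hp
      have hmem : (g0 :: gs)[k] ∈ (g0 :: gs) := List.getElem_mem hk
      have hrow : g0.length ≤ 2 ∨ g0.length ≤ ((g0 :: gs)[k]).length := by
        rcases hcase with h2 | hall
        · exact Or.inl h2
        · exact Or.inr (hall _ hmem)
      exact pvRow_eq g0.length _ hrow acc _
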